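-- pv_equiv track=rewrite | github.com/AndersonMedina/chicago_bikeshare_project | chicago_bikeshare.py | count_user_types
-- ===== SOURCE A (Python) =====
-- def count_user_types(data_list):
--     subscriber = 0
--     customer = 0
--     for line in range(len(data_list)):
--         if data_list[line][-2] == "Subscriber":
--             subscriber += 1
--         elif data_list[line][-2] == "Customer":
--             customer += 1
--     return [subscriber, customer]
-- ===== SOURCE B (Python) =====
-- def count_user_types(data_list):
--     column = [line[-2] for line in data_list]
--     return [column.count(tag) for tag in ("Subscriber", "Customer")]
-- ===== Notes on version B (the rewrite author's own statement) =====
-- stated objective: idiomatic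
-- what changed: B replaces A's single index-based loop maintaining two counters through an if/elif chain with staged passes: it first extracts the user-type column as a list, then answers each tag with a separate list.count pass over that column (no running accumulator at all).
import Mathlib
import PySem

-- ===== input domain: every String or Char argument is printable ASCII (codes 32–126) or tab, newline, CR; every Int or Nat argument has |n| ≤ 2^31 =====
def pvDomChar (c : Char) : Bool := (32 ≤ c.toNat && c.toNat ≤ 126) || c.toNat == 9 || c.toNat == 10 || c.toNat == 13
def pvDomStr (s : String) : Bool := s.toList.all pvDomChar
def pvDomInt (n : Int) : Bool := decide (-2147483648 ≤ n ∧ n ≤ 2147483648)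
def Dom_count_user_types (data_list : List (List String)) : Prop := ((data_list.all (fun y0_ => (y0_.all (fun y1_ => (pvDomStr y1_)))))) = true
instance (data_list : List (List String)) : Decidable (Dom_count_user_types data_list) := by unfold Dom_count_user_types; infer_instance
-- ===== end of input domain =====

-- B counts by staged passes (extract the column, then one list.count per tag) instead of A's running two-counter loop (idiomatic; same O(n) cost).

-- ===== PORT A =====
def count_user_types (data_list : List (List String)) : List Int :=
  let st := (PySem.List.pyRange 0 (data_list.length : Int) 1).foldl
    (fun (st : Int × Int) line =>
      let row := PySem.List.pyGetD data_list line []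
      if PySem.List.pyGetD row (-2) "" = "Subscriber" then (st.1 + 1, st.2)
      else if PySem.List.pyGetD row (-2) "" = "Customer" then (st.1, st.2 + 1)
      else st)
    ((0 : Int), (0 : Int))
  [st.1, st.2]

-- ===== PORT B =====
def count_user_types_alt (data_list : List (List String)) : List Int :=
  let column := data_list.map (fun line => PySem.List.pyGetD line (-2) "")
  ["Subscriber", "Customer"].map (fun tag => (PySem.List.count column tag : Int))

-- ===== PRECONDITION & SPEC =====
-- Pre_ excludes exactly the inputs where Python A raises IndexError: a row with fewer than 2 fields (line[-2] out of range).
def Pre_count_user_types (data_list : List (List String)) : Prop :=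
  ∀ row ∈ data_list, 2 ≤ row.length
instance (data_list : List (List String)) : Decidable (Pre_count_user_types data_list) := by unfold Pre_count_user_types; infer_instance
def pvWitness_count_user_types : List (List String) := [["Subscriber", "10"], ["Customer", "7"]]

def Spec_count_user_types (data_list : List (List String)) (out : List Int) : Prop := out = count_user_types_alt data_list
instance (data_list : List (List String)) (out : List Int) : Decidable (Spec_count_user_types data_list out) := by unfold Spec_count_user_types; infer_instance

-- ===== CLAIM (what is proved, stated in full; the proofs are below) =====
def Claim_equal_count_user_types : Prop := ∀ (data_list : List (List String)), Dom_count_user_types data_list → Pre_count_user_types data_list → Spec_count_user_types data_list (count_user_types data_list)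

-- ===== LEMMAS AND PROOFS =====

-- the key each program extracts from a row (row[-2], total form)
def pvKey (row : List String) : String := PySem.List.pyGetD row (-2) ""

-- A's fold over the rows computes the two column counts, shifted by the accumulator
theorem pvA_fold (dl : List (List String)) (a b : Int) :
    dl.foldl (fun (st : Int × Int) row =>
        if PySem.List.pyGetD row (-2) "" = "Subscriber" then (st.1 + 1, st.2)
        else if PySem.List.pyGetD row (-2) "" = "Customer" then (st.1, st.2 + 1) else st) (a, b)
      = (a + ((dl.map pvKey).count "Subscriber" : Int),
         b + ((dl.map pvKey).count "Customer" : Int)) := by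
  induction dl generalizing a b with
  | nil => simp
  | cons r t ih =>
    simp only [List.foldl_cons, List.map_cons]
    by_cases h1 : PySem.List.pyGetD r (-2) "" = "Subscriber"
    · simp [pvKey, h1, ih]
      omega
    · by_cases h2 : PySem.List.pyGetD r (-2) "" = "Customer"
      · simp [pvKey, h2, ih]
        omega
      · simp [pvKey, h1, h2, ih]

-- ===== VERDICT (by name: the statement is the Claim_ definition above) =====
theorem count_user_types_spec : Claim_equal_count_user_types := by
  intro dl _hdom _hpre
  unfold Spec_count_user_types count_user_types count_user_types_alt
  simp only []
  rw [PySem.List.foldl_pyRange_zero_pyGetD' (f := fun (st : Int × Int) (row : List String) =>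
      if PySem.List.pyGetD row (-2) "" = "Subscriber" then (st.1 + 1, st.2)
      else if PySem.List.pyGetD row (-2) "" = "Customer" then (st.1, st.2 + 1) else st)]
  rw [pvA_fold dl 0 0]
  simp only [PySem.List.count_eq]
  unfold pvKey
  simp [List.map]
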